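-- pv_equiv track=rewrite | github.com/alexandru-dinu/advent-of-code | 2020/10/main.py | get_difference_product
-- ===== SOURCE A (Python) =====
-- def get_difference_product(zs: set):
--     xs = zs.copy()
--     d1 = d3 = 0
--     src = 0
--
--     while len(xs) > 0:
--         # if there are multiple possibilities, greedily select min
--         adapter = min(xs & {src + 1, src + 2, src + 3})
--
--         xs.remove(adapter)
--         diff = adapter - src
--         d1 += diff == 1
--         d3 += diff == 3
--         src = adapter
--
--     # + 1 for own device which always has a diff of 3
--     return d1 * (d3 + 1)
-- ===== SOURCE B (Python) =====
-- def get_difference_product(zs: set):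
--     # sort-then-scan over consecutive differences instead of the greedy set walk
--     d1 = d3 = 0
--     src = 0
--     for x in sorted(zs):
--         d = x - src
--         if d == 1:
--             d1 += 1
--         elif d == 3:
--             d3 += 1
--         elif d != 2:
--             raise ValueError(f"unreachable adapter gap: {d}")
--         src = x
--     return d1 * (d3 + 1)
-- ===== Notes on version B (the rewrite author's own statement) =====
-- stated objective: idiomatic
-- what changed: Replaces the greedy while-loop that repeatedly intersects the remaining set with {src+1,src+2,src+3} and removes the min by a single sort followed by one scan over consecutive differences (raising ValueError on an unreachable gap, exactly where A's min() of an empty intersection raises).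
import Mathlib
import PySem

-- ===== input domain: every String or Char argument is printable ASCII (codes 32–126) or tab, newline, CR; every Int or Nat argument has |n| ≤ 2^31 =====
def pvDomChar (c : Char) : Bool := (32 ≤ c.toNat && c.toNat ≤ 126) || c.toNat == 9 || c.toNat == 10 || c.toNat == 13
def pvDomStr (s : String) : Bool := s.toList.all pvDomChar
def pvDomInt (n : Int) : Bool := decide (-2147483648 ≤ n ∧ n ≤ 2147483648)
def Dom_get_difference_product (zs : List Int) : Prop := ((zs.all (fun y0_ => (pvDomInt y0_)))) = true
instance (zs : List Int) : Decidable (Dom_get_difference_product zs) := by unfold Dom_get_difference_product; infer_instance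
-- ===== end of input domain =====

-- B replaces A's greedy set-intersection walk by sort-then-scan over consecutive
-- differences (same values and same ValueError points; not claimed faster).


-- ===== PORT A =====
-- termination helper for the while loop: removing an element shrinks the set
theorem pvRemoveLen (xs : List Int) (x : Int) (hxs : xs ≠ []) :
    ((PySem.Set.remove? xs x).getD []).length < xs.length := by
  rcases hr : PySem.Set.remove? xs x with _ | r
  · simpa [List.length_pos_iff] using hxs
  · have hx : x ∈ xs := by
      by_contra hx
      rw [(PySem.Set.remove?_eq_none_iff xs x).2 hx] at hr
      simp at hr
    rw [PySem.Set.remove?_of_mem hx] at hr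
    have hr' : r = PySem.Set.discard xs x := (Option.some.inj hr).symm
    subst hr'
    simp only [PySem.Set.discard, Option.getD_some]
    exact List.length_filter_lt_length_iff_exists.2 ⟨x, hx, by simp⟩

-- the while loop of A: state (xs, d1, d3, src); the two 0 branches are where the
-- Python raises (min() of an empty set: ValueError; remove of a missing element:
-- KeyError, unreachable since the chosen adapter is in xs) — both outside Pre_.
def pvLoopA (xs : List Int) (d1 d3 src : Int) : Int :=
  if hxs : xs = [] then
    d1 * (d3 + 1)
  else
    match PySem.List.min? (PySem.Set.inter xs [src + 1, src + 2, src + 3]) (fun x => x) with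
    | none => 0
    | some adapter =>
      pvLoopA ((PySem.Set.remove? xs adapter).getD [])
        (d1 + (if adapter - src = 1 then 1 else 0))
        (d3 + (if adapter - src = 3 then 1 else 0)) adapter
termination_by xs.length
decreasing_by exact pvRemoveLen xs adapter hxs

def get_difference_product (zs : List Int) : Int :=
  pvLoopA (PySem.Set.ofList zs) 0 0 0

-- ===== PORT B =====
-- the for loop of B over the sorted adapters; none = the raise ValueError branch
def pvLoopB (src : Int) (ys : List Int) (d1 d3 : Int) : Option Int :=
  match ys with
  | [] => some (d1 * (d3 + 1))
  | x :: t =>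
    let d := x - src
    if d = 1 then pvLoopB x t (d1 + 1) d3
    else if d = 3 then pvLoopB x t d1 (d3 + 1)
    else if d ≠ 2 then none  -- raise ValueError
    else pvLoopB x t d1 d3

def get_difference_product_alt (zs : List Int) : Int :=
  match pvLoopB 0 (PySem.List.sorted (PySem.Set.ofList zs) (fun x => x)) 0 0 with
  | some v => v
  | none => 0  -- ValueError (outside Pre_)

-- ===== PRECONDITION & SPEC =====
-- Pre_ is exactly where A returns: the distinct values are positive and every value is
-- reachable from below within a gap of 3 (either ≤ 3, or some smaller value within 3
-- is present); otherwise A's min() of an empty intersection raises ValueError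
-- (and B raises ValueError too).
def Pre_get_difference_product (zs : List Int) : Prop :=
  (∀ x ∈ zs, 0 < x) ∧ (∀ x ∈ zs, x ≤ 3 ∨ ∃ y ∈ zs, y < x ∧ x - y ≤ 3)
instance (zs : List Int) : Decidable (Pre_get_difference_product zs) := by
  unfold Pre_get_difference_product; infer_instance

def pvWitness_get_difference_product : List Int := [1, 4, 5, 6, 7, 10, 11, 12]

def Spec_get_difference_product (zs : List Int) (out : Int) : Prop := out = get_difference_product_alt zs
instance (zs : List Int) (out : Int) : Decidable (Spec_get_difference_product zs out) := by unfold Spec_get_difference_product; infer_instance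

-- ===== CLAIM (what is proved, stated in full; the proofs are below) =====
def Claim_equal_get_difference_product : Prop := ∀ (zs : List Int), Dom_get_difference_product zs → Pre_get_difference_product zs → Spec_get_difference_product zs (get_difference_product zs)

-- ===== LEMMAS AND PROOFS =====

-- Pre_ forces gaps of 1..3 along any strictly increasing enumeration started at src
theorem pvChainOK (ys : List Int) (src : Int)
    (hp : ys.Pairwise (· < ·)) (hgt : ∀ y ∈ ys, src < y)
    (hre : ∀ x ∈ ys, x ≤ src + 3 ∨ ∃ y ∈ ys, y < x ∧ x - y ≤ 3) :
    List.IsChain (fun a b => 1 ≤ b - a ∧ b - a ≤ 3) (src :: ys) := by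
  induction ys generalizing src with
  | nil => exact List.IsChain.singleton src
  | cons h t ih =>
    have hlt : ∀ y ∈ t, h < y := fun y hy => (List.pairwise_cons.1 hp).1 y hy
    have hsrc : src < h := hgt h (List.mem_cons_self ..)
    have hle : h ≤ src + 3 := by
      rcases hre h (List.mem_cons_self ..) with h1 | ⟨y, hy, hylt, _⟩
      · exact h1
      · rcases List.mem_cons.1 hy with rfl | hy'
        · omega
        · exact absurd hylt (by have := hlt y hy'; omega)
    refine List.isChain_cons_cons.2 ⟨⟨by omega, by omega⟩, ?_⟩
    refine ih h (List.pairwise_cons.1 hp).2 hlt ?_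
    intro x hx
    rcases hre x (List.mem_cons_of_mem _ hx) with h1 | ⟨y, hy, hylt, hyle⟩
    · left; omega
    · rcases List.mem_cons.1 hy with rfl | hy'
      · left; omega
      · exact Or.inr ⟨y, hy', hylt, hyle⟩

-- main loop correspondence: A's greedy walk over xs equals B's scan of its sorted form
theorem pvLoopEq (ys : List Int) : ∀ (xs : List Int) (src d1 d3 : Int),
    xs.Nodup → ys.Perm xs → ys.Pairwise (· < ·) →
    List.IsChain (fun a b => 1 ≤ b - a ∧ b - a ≤ 3) (src :: ys) →
    pvLoopB src ys d1 d3 = some (pvLoopA xs d1 d3 src) := by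
  induction ys with
  | nil =>
    intro xs src d1 d3 _ hperm _ _
    have hxs : xs = [] := hperm.symm.eq_nil
    simp [pvLoopB, pvLoopA, hxs]
  | cons h t ih =>
    intro xs src d1 d3 hnd hperm hp hchain
    have hchain' := List.isChain_cons_cons.1 hchain
    have hgap1 : 1 ≤ h - src := hchain'.1.1
    have hgap3 : h - src ≤ 3 := hchain'.1.2
    have hhx : h ∈ xs := hperm.mem_iff.1 (List.mem_cons_self ..)
    have hxs : xs ≠ [] := by
      intro hx; rw [hx] at hhx; exact List.not_mem_nil hhx
    have hlt : ∀ y ∈ t, h < y := fun y hy => (List.pairwise_cons.1 hp).1 y hy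
    -- the min of xs ∩ {src+1, src+2, src+3} is h
    have hmin : PySem.List.min? (PySem.Set.inter xs [src + 1, src + 2, src + 3]) (fun x => x)
        = some h := by
      have hhin : h ∈ PySem.Set.inter xs [src + 1, src + 2, src + 3] := by
        rw [PySem.Set.mem_inter]
        refine ⟨hhx, ?_⟩
        have : h = src + 1 ∨ h = src + 2 ∨ h = src + 3 := by omega
        rcases this with rfl | rfl | rfl <;> simp
      rcases hm : PySem.List.min? (PySem.Set.inter xs [src + 1, src + 2, src + 3]) (fun x => x) with _ | m
      · exact absurd ((PySem.List.min?_eq_none_iff ..).1 hm ▸ hhin) (List.not_mem_nil)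
      · have hmmem : m ∈ xs := ((PySem.Set.mem_inter ..).1 (PySem.List.min?_mem hm)).1
        have hmle : m ≤ h := PySem.List.min?_isMin hm h hhin
        have hhm : h ≤ m := by
          rcases List.mem_cons.1 (hperm.mem_iff.2 hmmem) with rfl | hm'
          · exact le_refl _
          · exact le_of_lt (hlt m hm')
        exact congrArg some (le_antisymm hmle hhm)
    -- removing h from xs leaves a permutation of t
    have hrem : PySem.Set.remove? xs h = some (PySem.Set.discard xs h) :=
      PySem.Set.remove?_of_mem hhx
    have hnd' : (PySem.Set.discard xs h).Nodup := PySem.Set.nodup_discard xs h hnd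
    have hperm' : t.Perm (PySem.Set.discard xs h) := by
      have hndt : t.Nodup := (List.pairwise_cons.1 hp).2.imp ne_of_lt
      refine (List.perm_ext_iff_of_nodup hndt hnd').2 (fun y => ?_)
      rw [PySem.Set.mem_discard]
      constructor
      · intro hy
        exact ⟨hperm.mem_iff.1 (List.mem_cons_of_mem _ hy), ne_of_gt (hlt y hy)⟩
      · rintro ⟨hy, hne⟩
        rcases List.mem_cons.1 (hperm.mem_iff.2 hy) with rfl | hy'
        · exact absurd rfl hne
        · exact hy'
    have hrec := ih (PySem.Set.discard xs h) h
      (d1 + (if h - src = 1 then 1 else 0)) (d3 + (if h - src = 3 then 1 else 0))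
      hnd' hperm' (List.pairwise_cons.1 hp).2 hchain'.2
    -- unfold one step of each loop
    rw [pvLoopA, dif_neg hxs, hmin]
    simp only [hrem, Option.getD_some]
    have hd : h - src = 1 ∨ h - src = 2 ∨ h - src = 3 := by omega
    rcases hd with hd | hd | hd <;>
      simp only [pvLoopB, hd] <;> norm_num <;> simpa [hd] using hrec

-- ===== VERDICT (by name: the statement is the Claim_ definition above) =====
theorem get_difference_product_spec : Claim_equal_get_difference_product := by
  intro zs _ hpre
  unfold Spec_get_difference_product get_difference_product get_difference_product_alt
  have hperm := PySem.List.sorted_perm (PySem.Set.ofList zs) (fun x => x) false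
  have hp := PySem.List.sorted_ofList_pairwise_lt zs
  have hmem : ∀ y, y ∈ PySem.List.sorted (PySem.Set.ofList zs) (fun x => x) ↔ y ∈ zs := by
    intro y
    rw [hperm.mem_iff, PySem.Set.mem_ofList]
  have hchain := pvChainOK (PySem.List.sorted (PySem.Set.ofList zs) (fun x => x)) 0 hp
    (fun y hy => hpre.1 y ((hmem y).1 hy))
    (by
      intro x hx
      rcases hpre.2 x ((hmem x).1 hx) with h1 | ⟨y, hy, h2, h3⟩
      · left; omega
      · exact Or.inr ⟨y, (hmem y).2 hy, h2, h3⟩)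
  rw [pvLoopEq (PySem.List.sorted (PySem.Set.ofList zs) (fun x => x))
    (PySem.Set.ofList zs) 0 0 0 (PySem.Set.nodup_ofList zs) hperm hp hchain]
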